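-- pv_equiv track=rewrite | github.com/npradaq/Tarea-MEL | Mel-Tarea-08.py | perfDivision
-- ===== SOURCE A (Python) =====
-- def perfDivision(a, d):
--     d_str = str(d)
--
--     ceros = True
--     cerosCount = 0
--
--     if d != 0:
--         while ceros:
--             if d_str[-1] == "0":
--                 cerosCount += 1
--                 d_str = d_str[:-1]
--                 if d_str != "":
--                     d = int(d_str)
--             else:
--                 ceros = False
--                 break
--
--     numDigits = len(d_str)
--
--     actualDigit = 1
--
--     flag = True
--
--     while (actualDigit <= numDigits) and flag:
--         if int(d_str[0:actualDigit]) >= a: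
--             flag = False
--         else:
--             actualDigit += 1
--
--
--     if flag:
--         answer = ""
--
--     else:
--         a_ = a
--         count = 0
--
--         while int(d_str[0:actualDigit]) >= a_:
--             a_ += a
--             count += 1
--
--         a_ -= a
--
--         digitDiff = int(d_str[0:actualDigit]) - a_
--
--         if digitDiff == 0:
--             if d_str[actualDigit: len(d_str)+1] != "":
--                 d = int(d_str[actualDigit:len(d_str)+1])
--             else:
--                 d = 0
--
--         else:
--             d = d = int(str(int(d_str[0:actualDigit]) - a_) + d_str[actualDigit:len(d_str)+1])
--
--         answer = str(count) + str(perfDivision(a, d))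
--
--     return answer + "0"*cerosCount
-- ===== SOURCE B (Python) =====
-- def perfDivision(a, d):
--     quotient = []
--     zero_stack = []
--     while True:
--         s = str(d)
--         zeros = 0
--         if d != 0:
--             while s[-1] == "0":
--                 zeros += 1
--                 s = s[:-1]
--         zero_stack.append(zeros)
--         k = next((i for i in range(1, len(s) + 1) if int(s[:i]) >= a), None)
--         if k is None:
--             break
--         prefix = int(s[:k])
--         q, r = divmod(prefix, a)
--         quotient.append(str(q))
--         rest = s[k:]
--         if r == 0:
--             d = int(rest) if rest else 0
--         else:
--             d = int(str(r) + rest)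
--     return "".join(quotient) + "".join("0" * z for z in reversed(zero_stack))
-- ===== Notes on version B (the rewrite author's own statement) =====
-- stated objective: alternative
-- what changed: Replaces A's recursion with an explicit while-loop that accumulates quotient digits and a stack of per-level trailing-zero counts (flushed in reverse at the end), and computes each quotient digit and remainder with one divmod instead of A's repeated-addition counting loop.
import Mathlib
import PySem

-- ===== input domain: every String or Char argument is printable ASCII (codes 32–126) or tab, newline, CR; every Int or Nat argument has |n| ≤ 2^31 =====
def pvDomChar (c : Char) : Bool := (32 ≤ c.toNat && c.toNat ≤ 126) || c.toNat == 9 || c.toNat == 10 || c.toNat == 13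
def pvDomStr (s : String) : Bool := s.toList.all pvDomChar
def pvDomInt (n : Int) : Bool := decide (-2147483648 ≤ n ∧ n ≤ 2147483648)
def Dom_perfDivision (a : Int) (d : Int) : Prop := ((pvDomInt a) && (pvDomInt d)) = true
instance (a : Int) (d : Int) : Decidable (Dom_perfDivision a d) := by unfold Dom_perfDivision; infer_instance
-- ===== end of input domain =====

-- B replaces A's recursion by an explicit accumulator loop with a stack of zero-counts, and A's
-- repeated-addition digit counting by one divmod (objective: alternative decomposition, same cost).

-- ===== PORT A =====

-- int(s); under Pre_ every parsed slice is a nonempty digit/sign string, so the ValueError default is unreachable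
def intOf (cs : List Char) : Int := (PySem.Int.ofChars? cs).getD 0

-- the `while ceros:` loop: strip trailing '0's of d_str, counting them (the loop's inner
-- reassignment `d = int(d_str)` is dead: d is overwritten before any later use, so it is not ported)
def stripZeros (cs : List Char) : List Char × Nat :=
  if h : PySem.List.pyGet? cs (-1) = some '0' then
    let r := stripZeros cs.dropLast
    (r.1, r.2 + 1)
  else (cs, 0)
termination_by cs.length
decreasing_by
  rw [PySem.List.pyGet?_neg_one] at h
  have hne : cs ≠ [] := by rintro rfl; simp at h
  have h1 : cs.dropLast.length = cs.length - 1 := List.length_dropLast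
  have h2 : 0 < cs.length := List.length_pos_iff.mpr hne
  omega

-- the `while (actualDigit <= numDigits) and flag:` search loop
def findPrefixA (a : Int) (cs : List Char) (actualDigit : Nat) : Option Nat :=
  if actualDigit ≤ cs.length then
    if a ≤ intOf (cs.take actualDigit) then some actualDigit
    else findPrefixA a cs (actualDigit + 1)
  else none
termination_by cs.length + 1 - actualDigit

-- the `while int(d_str[0:actualDigit]) >= a_:` repeated-addition loop; returns (count, a_).
-- the fuel argument only makes the loop total (the caller supplies enough for every input in Pre_)
def countLoopA (a x : Int) : Nat → Int → Int → Int × Int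
  | 0, a_, count => (count, a_)
  | fuel + 1, a_, count =>
    if a_ ≤ x then countLoopA a x fuel (a_ + a) (count + 1) else (count, a_)

-- the recursive body of A; fuel only makes the recursion total (d decreases strictly, so
-- d.toNat + 1 is always enough inside Pre_)
def goA (a : Int) : Nat → Int → String
  | 0, _ => ""
  | fuel + 1, d =>
    let s0 := (PySem.Int.toStr d).toList
    let sc := if d ≠ 0 then stripZeros s0 else (s0, 0)
    let s := sc.1
    let cerosCount := sc.2
    match findPrefixA a s 1 with
    | none => "" ++ String.ofList (List.replicate cerosCount '0')
    | some actualDigit =>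
      let pfx := intOf (s.take actualDigit)
      let ca := countLoopA a pfx (pfx.toNat + 1) a 0
      let a_ := ca.2 - a
      let digitDiff := pfx - a_
      let d' := if digitDiff = 0 then
                  if s.drop actualDigit ≠ [] then intOf (s.drop actualDigit) else 0
                else intOf ((PySem.Int.toStr digitDiff).toList ++ s.drop actualDigit)
      (PySem.Int.toStr ca.1 ++ goA a fuel d') ++ String.ofList (List.replicate cerosCount '0')

def perfDivision (a : Int) (d : Int) : String := goA a (d.toNat + 1) d

-- ===== PORT B =====

-- "".join("0" * z for z in l)
def zerosJoin (l : List Nat) : String :=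
  String.ofList ((l.map (fun z => List.replicate z '0')).flatten)

-- next((i for i in range(1, len(s) + 1) if int(s[:i]) >= a), None)
def findPrefixB (a : Int) (cs : List Char) : Option Nat :=
  (List.range' 1 cs.length).find? (fun k => a ≤ intOf (cs.take k))

-- B's while-True loop: quotient accumulator and zero-count stack; fuel only makes the loop total
def goB (a : Int) : Nat → Int → String → List Nat → String
  | 0, _, acc, stack => acc ++ zerosJoin stack.reverse
  | fuel + 1, d, acc, stack =>
    let s0 := (PySem.Int.toStr d).toList
    let sc := if d ≠ 0 then stripZeros s0 else (s0, 0)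
    let s := sc.1
    let stack' := stack ++ [sc.2]
    match findPrefixB a s with
    | none => acc ++ zerosJoin stack'.reverse
    | some k =>
      let pfx := intOf (s.take k)
      let q := PySem.Int.floordiv pfx a
      let r := PySem.Int.mod pfx a
      let rest := s.drop k
      let d' := if r = 0 then (if rest ≠ [] then intOf rest else 0)
                else intOf ((PySem.Int.toStr r).toList ++ rest)
      goB a fuel d' (acc ++ PySem.Int.toStr q) stack'

def perfDivision_alt (a : Int) (d : Int) : String := goB a (d.toNat + 1) d "" []

-- ===== PRECONDITION & SPEC =====
-- Exactly the inputs on which Python A returns: for d < 0 A raises ValueError (int("-") on the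
-- one-character prefix "-"), and for a ≤ 0 A's repeated-addition loop `while prefix >= a_` never
-- terminates (a_ does not increase), so A returns on no input outside a ≥ 1 ∧ d ≥ 0.
def Pre_perfDivision (a : Int) (d : Int) : Prop := 1 ≤ a ∧ 0 ≤ d
instance (a : Int) (d : Int) : Decidable (Pre_perfDivision a d) := by
  unfold Pre_perfDivision; infer_instance

def pvWitness_perfDivision : Int × Int := (3, 126)

def Spec_perfDivision (a : Int) (d : Int) (out : String) : Prop := out = perfDivision_alt a d
instance (a : Int) (d : Int) (out : String) : Decidable (Spec_perfDivision a d out) := by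
  unfold Spec_perfDivision; infer_instance

-- ===== CLAIM (what is proved, stated in full; the proofs are below) =====
def Claim_equal_perfDivision : Prop := ∀ (a : Int) (d : Int), Dom_perfDivision a d → Pre_perfDivision a d → Spec_perfDivision a d (perfDivision a d)

-- ===== LEMMAS AND PROOFS =====

lemma zerosJoin_cons (z : Nat) (l : List Nat) :
    zerosJoin (z :: l) = String.ofList (List.replicate z '0') ++ zerosJoin l := by
  simp [zerosJoin, String.ofList_append]

lemma findPrefixA_eq_range (a : Int) (cs : List Char) :
    ∀ (m i : Nat), m = cs.length + 1 - i →
      findPrefixA a cs i = (List.range' i m).find? (fun k => a ≤ intOf (cs.take k)) := by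
  intro m
  induction m with
  | zero =>
    intro i h
    unfold findPrefixA
    rw [if_neg (by omega)]
    simp
  | succ n ih =>
    intro i h
    unfold findPrefixA
    rw [if_pos (by omega), List.range'_succ]
    by_cases hp : a ≤ intOf (cs.take i)
    · simp [List.find?, hp]
    · rw [if_neg hp]
      simp only [List.find?, hp, decide_false]
      exact ih (i + 1) (by omega)

lemma findPrefixB_eq (a : Int) (cs : List Char) :
    findPrefixB a cs = findPrefixA a cs 1 := by
  rw [findPrefixA_eq_range a cs cs.length 1 (by omega)]
  rfl

lemma findPrefixA_some_ge (a : Int) (cs : List Char) (k : Nat)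
    (h : findPrefixA a cs 1 = some k) : a ≤ intOf (cs.take k) := by
  rw [findPrefixA_eq_range a cs cs.length 1 (by omega)] at h
  have := List.find?_some h
  simpa using this

lemma countLoopA_spec (a x : Int) (ha : 1 ≤ a) :
    ∀ (fuel : Nat) (c : Int), c * a ≤ x → x < a * (c + 1) + a * fuel →
      countLoopA a x fuel (a * (c + 1)) c =
        (PySem.Int.floordiv x a, a * PySem.Int.floordiv x a + a) := by
  intro fuel
  induction fuel with
  | zero =>
    intro c hc hub
    have hq : PySem.Int.floordiv x a = c :=
      (PySem.Int.floordiv_eq_iff_of_pos (by omega)).mpr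
        ⟨hc, by push_cast at hub; linarith [mul_comm a (c + 1)]⟩
    simp [countLoopA, hq, mul_add]
  | succ n ih =>
    intro c hc hub
    unfold countLoopA
    by_cases hle : a * (c + 1) ≤ x
    · rw [if_pos hle]
      have h2 : a * (c + 1) + a = a * (c + 1 + 1) := by ring
      rw [h2]
      have hub' : x < a * (c + 1 + 1) + a * n := by
        push_cast at hub; linarith [mul_add a c 1, mul_add a (c+1) 1]
      have := ih (c + 1) (by linarith [mul_comm a (c + 1)]) hub'
      simpa using this
    · rw [if_neg hle]
      have hq : PySem.Int.floordiv x a = c :=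
        (PySem.Int.floordiv_eq_iff_of_pos (by omega)).mpr
          ⟨hc, by linarith [mul_comm a (c + 1)]⟩
      simp [hq, mul_add]

lemma go_eq (a : Int) (ha : 1 ≤ a) :
    ∀ (fuel : Nat) (d : Int) (acc : String) (stack : List Nat),
      goB a fuel d acc stack = acc ++ goA a fuel d ++ zerosJoin stack.reverse := by
  intro fuel
  induction fuel with
  | zero =>
    intro d acc stack
    simp [goA, goB]
  | succ n ih =>
    intro d acc stack
    rw [goA, goB, findPrefixB_eq]
    set sc := if d ≠ 0 then stripZeros (PySem.Int.toStr d).toList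
              else ((PySem.Int.toStr d).toList, 0) with hsc
    cases hfp : findPrefixA a sc.1 1 with
    | none =>
      dsimp only
      simp only [List.reverse_append, List.reverse_cons, List.reverse_nil, List.nil_append,
        List.singleton_append, zerosJoin_cons, String.append_assoc, String.empty_append]
    | some k =>
      have hge : a ≤ intOf (sc.1.take k) := findPrefixA_some_ge a sc.1 k hfp
      dsimp only
      rw [ih]
      set pfx := intOf (sc.1.take k) with hpfx
      have hfuel : pfx < a * (0 + 1) + a * ((pfx.toNat + 1 : Nat) : Int) := by
        have h1 : (1 : Int) * ((pfx.toNat + 1 : Nat) : Int) ≤ a * ((pfx.toNat + 1 : Nat) : Int) := by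
          apply mul_le_mul_of_nonneg_right (by omega) (by positivity)
        have h2 : (pfx.toNat : Int) = pfx := Int.toNat_of_nonneg (by omega)
        push_cast at h1 ⊢
        nlinarith
      have hcl := countLoopA_spec a pfx ha (pfx.toNat + 1) 0
        (by simp only [zero_mul]; omega) hfuel
      rw [show a * (0 + 1) = a from by ring] at hcl
      rw [hcl]
      dsimp only
      have hmod : PySem.Int.mod pfx a =
          pfx - (a * PySem.Int.floordiv pfx a + a - a) := by
        have h := PySem.Int.floordiv_mul_add_mod pfx a
        linarith [mul_comm (PySem.Int.floordiv pfx a) a]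
      rw [hmod]
      simp only [List.reverse_append, List.reverse_cons, List.reverse_nil, List.nil_append,
        List.singleton_append, zerosJoin_cons, String.append_assoc]

-- ===== VERDICT (by name: the statement is the Claim_ definition above) =====
theorem perfDivision_spec : Claim_equal_perfDivision := by
  intro a d _ hpre
  unfold Spec_perfDivision perfDivision perfDivision_alt
  rw [go_eq a hpre.1]
  simp [zerosJoin, String.empty_append, String.append_empty]
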